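-- pv_equiv track=rewrite | github.com/Leonardo08202689/Analizador-de-secuencias-ADN | app.py | colorear_secuencia
-- ===== SOURCE A (Python) =====
-- def colorear_secuencia(seq):
--     colored = ""
--     for i, n in enumerate(seq):
--         colored += f'<span class="nuc-{n}">{n}</span>'
--         if (i + 1) % 10 == 0:
--             colored += " "
--         if (i + 1) % 60 == 0:
--             colored += "<br>"
--     return colored
-- ===== SOURCE B (Python) =====
-- def colorear_secuencia(seq):
--     # Block decomposition: walk the sequence in 10-character slices, emitting
--     # each block's spans, a space after every full block and the line-break tag after
--     # every 6th full block; join the pieces at the end.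
--     parts = []
--     start = 0
--     bi = 0
--     while start < len(seq):
--         block = seq[start:start + 10]
--         parts.append("".join(f'<span class="nuc-{n}">{n}</span>' for n in block))
--         if len(block) == 10:
--             parts.append(" ")
--             if bi % 6 == 5:
--                 parts.append("<br>")
--         start += 10
--         bi += 1
--     return "".join(parts)
-- ===== Notes on version B (the rewrite author's own statement) =====
-- stated objective: alternative
-- what changed: Replaces A's per-character loop with modular position counters by an iterative block decomposition: render 10-character slices, appending the space after each full block and the line-break tag after every 6th full block, joining the collected pieces at the end.
import Mathlib
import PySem

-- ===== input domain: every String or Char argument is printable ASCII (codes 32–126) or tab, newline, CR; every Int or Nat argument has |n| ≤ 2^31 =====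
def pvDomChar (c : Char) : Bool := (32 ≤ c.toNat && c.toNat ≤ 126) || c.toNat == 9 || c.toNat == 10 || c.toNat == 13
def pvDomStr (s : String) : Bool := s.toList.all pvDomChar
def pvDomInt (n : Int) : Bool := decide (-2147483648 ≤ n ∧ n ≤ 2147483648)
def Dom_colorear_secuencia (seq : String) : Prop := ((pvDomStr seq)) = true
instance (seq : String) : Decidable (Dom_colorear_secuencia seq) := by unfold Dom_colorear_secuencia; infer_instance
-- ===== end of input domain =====

-- B renders the sequence by 10-character blocks recursively instead of A's per-character
-- loop with modular counters; same output, different decomposition (objective: alternative).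

-- shared helper: the f-string '<span class="nuc-{n}">{n}</span>' as a List Char
def pvSpan (n : Char) : List Char :=
  "<span class=\"nuc-".toList ++ [n] ++ "\">".toList ++ [n] ++ "</span>".toList

-- ===== PORT A =====
-- per-character fold over enumerate(seq); the string is built as a List Char (PySem.Chars style)
def colorear_secuencia (seq : String) : String :=
  String.ofList <|
    (PySem.List.enumerate seq.toList 0).foldl
      (fun colored p =>
        let colored := colored ++ pvSpan p.2
        let colored := if PySem.Int.mod (p.1 + 1) 10 = 0 then colored ++ [' '] else colored
        if PySem.Int.mod (p.1 + 1) 60 = 0 then colored ++ "<br>".toList else colored)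
      []

-- ===== PORT B =====
-- seq[start:start+10] is PySem.List.slice with natural bounds; the while loop is
-- structural recursion on l.length - start; ''.join(parts) is List.flatten
def pvLoopB (l : List Char) (start bi : Nat) (parts : List (List Char)) : List (List Char) :=
  if _h : start < l.length then
    let block := PySem.List.slice l (some (start : Int)) (some ((start + 10 : Nat) : Int))
    let parts := parts ++ [block.flatMap pvSpan]
    let parts :=
      if block.length = 10 then
        let parts := parts ++ [[' ']]
        if bi % 6 = 5 then parts ++ ["<br>".toList] else parts
      else parts
    pvLoopB l (start + 10) (bi + 1) parts
  else parts
termination_by l.length - start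

def colorear_secuencia_alt (seq : String) : String :=
  String.ofList (pvLoopB seq.toList 0 0 []).flatten

-- ===== PRECONDITION & SPEC =====
def Spec_colorear_secuencia (seq : String) (out : String) : Prop := out = colorear_secuencia_alt seq
instance (seq : String) (out : String) : Decidable (Spec_colorear_secuencia seq out) := by unfold Spec_colorear_secuencia; infer_instance

-- ===== CLAIM (what is proved, stated in full; the proofs are below) =====
def Claim_equal_colorear_secuencia : Prop := ∀ (seq : String), Dom_colorear_secuencia seq → Spec_colorear_secuencia seq (colorear_secuencia seq)

-- ===== LEMMAS AND PROOFS =====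

-- common characterisation of the output: what both programs emit for the character at index i
def pvRender : List Char → Nat → List Char
  | [], _ => []
  | c :: cs, i =>
      pvSpan c ++ (if (i + 1) % 10 = 0 then [' '] else [])
        ++ (if (i + 1) % 60 = 0 then "<br>".toList else []) ++ pvRender cs (i + 1)

lemma pvMod10 (k : Nat) : PySem.Int.mod (k : Int) 10 = ((k % 10 : Nat) : Int) := by
  exact_mod_cast PySem.Int.mod_natCast k 10

lemma pvMod60 (k : Nat) : PySem.Int.mod (k : Int) 60 = ((k % 60 : Nat) : Int) := by
  exact_mod_cast PySem.Int.mod_natCast k 60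

lemma pvA_eq (l : List Char) : ∀ (i : Nat) (acc : List Char),
    (PySem.List.enumerate l (i : Int)).foldl
      (fun colored p =>
        let colored := colored ++ pvSpan p.2
        let colored := if PySem.Int.mod (p.1 + 1) 10 = 0 then colored ++ [' '] else colored
        if PySem.Int.mod (p.1 + 1) 60 = 0 then colored ++ "<br>".toList else colored)
      acc = acc ++ pvRender l i := by
  induction l with
  | nil => intro i acc; simp [PySem.List.enumerate_nil, pvRender]
  | cons c cs ih =>
    intro i acc
    rw [PySem.List.enumerate_cons, List.foldl_cons]
    have hc : ((i : Int) + 1) = ((i + 1 : Nat) : Int) := by push_cast; ring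
    simp only [hc, pvMod10, pvMod60, Nat.cast_eq_zero]
    rw [ih (i + 1)]
    simp only [pvRender]
    split_ifs <;> simp [List.append_assoc]

lemma pvRender_append (l1 l2 : List Char) : ∀ i,
    pvRender (l1 ++ l2) i = pvRender l1 i ++ pvRender l2 (i + l1.length) := by
  induction l1 with
  | nil => intro i; simp [pvRender]
  | cons c cs ih =>
    intro i
    simp only [List.cons_append, pvRender, ih (i + 1), List.length_cons, List.append_assoc]
    ring_nf

lemma pvRender_nomark (l : List Char) : ∀ i, (∀ j < l.length, (i + j + 1) % 10 ≠ 0) →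
    pvRender l i = l.flatMap pvSpan := by
  induction l with
  | nil => intro i _; simp [pvRender]
  | cons c cs ih =>
    intro i h
    have h0 : (i + 1) % 10 ≠ 0 := by simpa using h 0 (by simp)
    have h60 : (i + 1) % 60 ≠ 0 := fun hc => h0 (by omega)
    rw [pvRender, if_neg h0, if_neg h60,
      ih (i + 1) (fun j hj => by have := h (j + 1) (by simpa using Nat.succ_lt_succ hj); omega)]
    simp

lemma pvRender_full (blk : List Char) (bi : Nat) (h : blk.length = 10) :
    pvRender blk (10 * bi) =
      blk.flatMap pvSpan ++ [' '] ++ (if bi % 6 = 5 then "<br>".toList else []) := by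
  have hdec : blk = blk.take 9 ++ blk.drop 9 := (List.take_append_drop 9 blk).symm
  obtain ⟨x, hx⟩ : ∃ x, blk.drop 9 = [x] := by
    have : (blk.drop 9).length = 1 := by simp [h]
    exact List.length_eq_one_iff.mp this
  rw [hdec, pvRender_append, hx]
  have h9 : (blk.take 9).length = 9 := by simp [h]
  rw [pvRender_nomark _ _ (fun j hj => by rw [h9] at hj; omega), h9]
  have hm10 : (10 * bi + 9 + 1) % 10 = 0 := by omega
  have hm60 : (10 * bi + 9 + 1) % 60 = 0 ↔ bi % 6 = 5 := by omega
  rw [pvRender, pvRender, if_pos hm10]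
  by_cases hb : bi % 6 = 5
  · rw [if_pos (hm60.mpr hb), if_pos hb]; simp
  · rw [if_neg (fun hc => hb (hm60.mp hc)), if_neg hb]; simp

lemma pvLoopB_eq (l : List Char) (n : Nat) : ∀ (start bi : Nat) (parts : List (List Char)),
    l.length - start ≤ n → start = 10 * bi →
    (pvLoopB l start bi parts).flatten = parts.flatten ++ pvRender (l.drop start) (10 * bi) := by
  induction n with
  | zero =>
    intro start bi parts hn hsb
    rw [pvLoopB, dif_neg (by omega), List.drop_eq_nil_of_le (by omega), pvRender]
    simp
  | succ n ih =>
    intro start bi parts hn hsb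
    rw [pvLoopB]
    by_cases hlt : start < l.length
    · rw [dif_pos hlt]
      simp only [PySem.List.slice_natCast, Nat.add_sub_cancel_left]
      rw [ih (start + 10) (bi + 1) _ (by omega) (by omega)]
      have hdd : l.drop (start + 10) = (l.drop start).drop 10 := by
        rw [List.drop_drop]
      by_cases hfull : ((l.drop start).take 10).length = 10
      · -- full block: split off 10 characters and their markers
        rw [if_pos hfull, hdd]
        conv_rhs => rw [show l.drop start = (l.drop start).take 10 ++ (l.drop start).drop 10
          from (List.take_append_drop 10 _).symm]
        rw [pvRender_append, pvRender_full _ _ hfull, hfull,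
          show 10 * bi + 10 = 10 * (bi + 1) by ring]
        split_ifs <;> simp [List.append_assoc]
      · -- short final block: it is the whole remainder, no markers
        have hshort : (l.drop start).length < 10 := by
          simp only [List.length_take, List.length_drop] at hfull ⊢; omega
        have htake : (l.drop start).take 10 = l.drop start := List.take_of_length_le (by omega)
        rw [if_neg hfull, hdd,
          show List.drop 10 (List.drop start l) = [] from List.drop_eq_nil_of_le (by omega),
          pvRender, htake, pvRender_nomark _ _ (fun j hj => by omega)]
        simp
    · rw [dif_neg hlt, List.drop_eq_nil_of_le (by omega), pvRender]
      simp

lemma pvA0 (l : List Char) :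
    (PySem.List.enumerate l 0).foldl
      (fun colored p =>
        let colored := colored ++ pvSpan p.2
        let colored := if PySem.Int.mod (p.1 + 1) 10 = 0 then colored ++ [' '] else colored
        if PySem.Int.mod (p.1 + 1) 60 = 0 then colored ++ "<br>".toList else colored)
      [] = pvRender l 0 := by
  have h := pvA_eq l 0 []
  simpa using h

-- ===== VERDICT (by name: the statement is the Claim_ definition above) =====
theorem colorear_secuencia_spec : Claim_equal_colorear_secuencia := by
  intro seq _
  unfold Spec_colorear_secuencia colorear_secuencia colorear_secuencia_alt
  rw [pvA0, pvLoopB_eq seq.toList seq.toList.length 0 0 [] (by omega) (by omega)]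
  simp
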